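-- pv_equiv track=rewrite | github.com/KosBeg/vbsopt | expand_dataset.py | _inject_noise
-- ===== SOURCE A (Python) =====
-- def _inject_noise(script: str) -> str:
--     lines = script.splitlines()
--     out: list[str] = []
--     inserted = False
--     for line in lines:
--         out.append(line)
--         stripped = line.strip()
--         safe_insert_after = (
--             bool(stripped)
--             and not stripped.lower().startswith('<script')
--             and not stripped.endswith('_')
--             and not stripped.endswith('&')
--             and not stripped.endswith(':')
--         )
--         if not inserted and safe_insert_after:
--             out.append("' generated-noise")
--             out.append('unused_generated = "AAAA"')
--             out.append("")
--             inserted = True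
--     if not inserted:
--         out.extend(["' generated-noise", 'unused_generated = "AAAA"'])
--     return "\n".join(out)
-- ===== SOURCE B (Python) =====
-- NOISE = ["' generated-noise", 'unused_generated = "AAAA"']
--
-- def _inject_noise(script: str) -> str:
--     def safe(line: str) -> bool:
--         s = line.strip()
--         return bool(s) and not s.lower().startswith('<script') \
--             and not s.endswith('_') and not s.endswith('&') and not s.endswith(':')
--
--     def go(lines: list) -> str:
--         # recursion on the line list, building the result string directly
--         if not lines:
--             return "\n".join(NOISE)
--         head, rest = lines[0], lines[1:]
--         if safe(head):
--             return "\n".join([head] + NOISE + [""] + rest)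
--         return "\n".join([head, go(rest)])
--
--     return go(script.splitlines())
-- ===== Notes on version B (the rewrite author's own statement) =====
-- stated objective: alternative
-- what changed: B replaces A's imperative loop over lines with an out-list accumulator and a boolean done-flag by a structural recursion that consumes the line list and builds the joined result string directly, splicing the noise block in at the first safe line and falling through to the two-line append in the base case.
import Mathlib
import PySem

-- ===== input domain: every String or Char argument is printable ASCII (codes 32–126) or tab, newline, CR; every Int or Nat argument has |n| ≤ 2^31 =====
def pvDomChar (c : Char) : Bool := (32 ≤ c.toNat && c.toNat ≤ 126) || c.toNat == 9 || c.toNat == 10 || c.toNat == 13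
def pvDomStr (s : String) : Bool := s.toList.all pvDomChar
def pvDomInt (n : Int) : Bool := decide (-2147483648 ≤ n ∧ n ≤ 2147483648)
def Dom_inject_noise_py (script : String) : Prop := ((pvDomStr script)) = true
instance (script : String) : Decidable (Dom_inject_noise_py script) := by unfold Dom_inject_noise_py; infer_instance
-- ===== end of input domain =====

-- B replaces A's imperative loop with a boolean done-flag by a structural recursion over the
-- line list that builds the joined result string directly; alternative decomposition, same cost.

-- shared predicate: both Pythons test the same 'safe to insert after this line' condition
def pvSafe (line : String) : Bool :=
  let stripped := PySem.Str.strip line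
  !(stripped == "") &&
  !(PySem.Str.startswith (PySem.Str.lower stripped) "<script") &&
  !(PySem.Str.endswith stripped "_") &&
  !(PySem.Str.endswith stripped "&") &&
  !(PySem.Str.endswith stripped ":")

def pvNoise2 : List String := ["' generated-noise", "unused_generated = \"AAAA\""]
def pvNoise3 : List String := ["' generated-noise", "unused_generated = \"AAAA\"", ""]

-- ===== PORT A =====
-- A's loop body
def pvStepA (st : List String × Bool) (line : String) : List String × Bool :=
  let out := st.1 ++ [line]
  if !st.2 && pvSafe line then (out ++ pvNoise3, true) else (out, st.2)

def inject_noise_py (script : String) : String :=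
  let lines := PySem.Str.splitlines script
  let st := lines.foldl pvStepA ([], false)
  PySem.Str.join "\n" (if st.2 then st.1 else st.1 ++ pvNoise2)

-- ===== PORT B =====
-- B's recursive helper 'go': consumes the line list, returning the joined string directly
def pvGo : List String → String
  | [] => PySem.Str.join "\n" pvNoise2
  | h :: rest =>
    if pvSafe h then PySem.Str.join "\n" ([h] ++ pvNoise2 ++ [""] ++ rest)
    else PySem.Str.join "\n" [h, pvGo rest]

def inject_noise_py_alt (script : String) : String :=
  pvGo (PySem.Str.splitlines script)

-- ===== PRECONDITION & SPEC =====
def Spec_inject_noise_py (script : String) (out : String) : Prop := out = inject_noise_py_alt script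
instance (script : String) (out : String) : Decidable (Spec_inject_noise_py script out) := by unfold Spec_inject_noise_py; infer_instance

-- ===== CLAIM =====
def Claim_equal_inject_noise_py : Prop := ∀ (script : String), Dom_inject_noise_py script → Spec_inject_noise_py script (inject_noise_py script)

-- ===== LEMMAS AND PROOFS =====

-- splitting off the head of a nonempty join
theorem pvJoin_cons (sep h : String) (t : List String) (ht : t ≠ []) :
    PySem.Str.join sep (h :: t) = PySem.Str.join sep [h, PySem.Str.join sep t] := by
  cases t with
  | nil => exact absurd rfl ht
  | cons x xs =>
    simp [PySem.Str.join, PySem.Chars.join, List.intercalate, List.intersperse, String.ofList]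

-- the list both programs' results join: lines with the noise block spliced at the first safe index
def pvResList (ls : List String) : List String :=
  match ls.findIdx? pvSafe with
  | none => ls ++ pvNoise2
  | some i => ls.take (i + 1) ++ pvNoise3 ++ ls.drop (i + 1)

-- once inserted, A's loop just appends the remaining lines
theorem pvLoop_true (ls : List String) : ∀ (out : List String),
    ls.foldl pvStepA (out, true) = (out ++ ls, true) := by
  induction ls with
  | nil => simp
  | cons l ls ih =>
    intro out
    rw [List.foldl_cons, show pvStepA (out, true) l = (out ++ [l], true) by simp [pvStepA],
      ih]
    simp

-- A's loop from an un-inserted state, characterised by the first safe index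
theorem pvLoop_false (ls : List String) : ∀ (out : List String),
    ls.foldl pvStepA (out, false) =
    (match ls.findIdx? pvSafe with
     | none => (out ++ ls, false)
     | some i => (out ++ ls.take (i + 1) ++ pvNoise3 ++ ls.drop (i + 1), true)) := by
  induction ls with
  | nil => simp
  | cons l ls ih =>
    intro out
    by_cases h : pvSafe l = true
    · rw [List.foldl_cons,
        show pvStepA (out, false) l = (out ++ [l] ++ pvNoise3, true) by simp [pvStepA, h],
        pvLoop_true]
      simp [List.findIdx?_cons, h]
    · rw [List.foldl_cons,
        show pvStepA (out, false) l = (out ++ [l], false) by simp [pvStepA, h],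
        ih (out ++ [l])]
      simp only [List.findIdx?_cons, h, Bool.false_eq_true, if_false]
      cases hf : ls.findIdx? pvSafe with
      | none => simp
      | some i => simp [List.take_succ_cons, List.drop_succ_cons]

-- pvResList is never empty
theorem pvResList_ne_nil (ls : List String) : pvResList ls ≠ [] := by
  unfold pvResList
  cases hf : ls.findIdx? pvSafe with
  | none => simp [pvNoise2]
  | some i => cases ls <;> simp [pvNoise3, List.take_succ_cons]

-- B's recursion computes the join of pvResList
theorem pvGo_eq (ls : List String) : pvGo ls = PySem.Str.join "\n" (pvResList ls) := by
  induction ls with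
  | nil => simp [pvGo, pvResList]
  | cons h rest ih =>
    by_cases hs : pvSafe h = true
    · simp only [pvGo, hs, if_true, pvResList, List.findIdx?_cons, List.take_succ_cons,
        List.drop_succ_cons, List.take_zero, List.drop_zero]
      simp [pvNoise2, pvNoise3]
    · rw [show pvGo (h :: rest) = PySem.Str.join "\n" [h, pvGo rest] by simp [pvGo, hs],
        ih, ← pvJoin_cons "\n" h (pvResList rest) (pvResList_ne_nil rest)]
      unfold pvResList
      simp only [List.findIdx?_cons, hs, Bool.false_eq_true, if_false]
      cases hf : rest.findIdx? pvSafe with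
      | none => simp
      | some i => simp [List.take_succ_cons, List.drop_succ_cons]

-- ===== VERDICT =====
theorem inject_noise_py_spec : Claim_equal_inject_noise_py := by
  intro script _
  unfold Spec_inject_noise_py inject_noise_py inject_noise_py_alt
  dsimp only
  rw [pvLoop_false, pvGo_eq]
  unfold pvResList
  cases hf : (PySem.Str.splitlines script).findIdx? pvSafe with
  | none => simp
  | some i => simp
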